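-- pv_equiv track=rewrite | github.com/JohnZDictator/competitive-programming | a2sv/camps/contests/contest 10 - codeforces/2.py | makeProductOne
-- ===== SOURCE A (Python) =====
-- def makeProductOne(arr, n):
--     coins = 0
--     zeros = 0
--     negatives = 0
--
--     for idx in range(n):
--         if arr[idx] >= 1:
--             coins += arr[idx] - 1
--         elif arr[idx] <= -1:
--             coins += abs(arr[idx]) - 1
--             negatives += 1
--         elif arr[idx] == 0:
--             zeros += 1
--
--     if (negatives + zeros) % 2 == 0 or negatives % 2 == 0:
--         return coins + zeros
--     elif negatives % 2 == 1:
--         return coins + zeros + 2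
-- ===== SOURCE B (Python) =====
-- def makeProductOne(arr, n):
--     xs = sorted(arr[idx] for idx in range(n))
--     neg = 0
--     while neg < len(xs) and xs[neg] < 0:
--         neg += 1
--     z = neg
--     while z < len(xs) and xs[z] == 0:
--         z += 1
--     zeros = z - neg
--     coins = sum(abs(x) for x in xs) - (len(xs) - zeros)
--     return coins + zeros + (2 if neg % 2 == 1 and zeros % 2 == 0 else 0)
-- ===== Notes on version B (the rewrite author's own statement) =====
-- stated objective: alternative
-- what changed: Instead of A's single fused counting loop with nested parity branches, B sorts the first n elements, locates the negative/zero boundaries with two while-scans over the sorted list, derives coins from the total absolute sum, and applies one closed +2 formula.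
import Mathlib
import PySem

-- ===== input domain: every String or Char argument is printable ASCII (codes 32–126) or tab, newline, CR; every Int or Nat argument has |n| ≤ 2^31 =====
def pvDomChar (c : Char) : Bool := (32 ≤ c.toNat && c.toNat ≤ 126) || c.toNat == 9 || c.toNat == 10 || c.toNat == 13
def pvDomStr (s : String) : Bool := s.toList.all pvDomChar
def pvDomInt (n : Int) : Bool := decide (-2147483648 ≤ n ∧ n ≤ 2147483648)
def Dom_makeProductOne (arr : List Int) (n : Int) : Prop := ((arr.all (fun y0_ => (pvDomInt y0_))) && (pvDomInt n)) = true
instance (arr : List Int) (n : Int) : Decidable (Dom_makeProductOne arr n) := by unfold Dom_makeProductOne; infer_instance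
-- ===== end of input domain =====

-- B sorts the first n elements, finds the negative/zero boundaries by scanning the sorted
-- list, and derives the coin cost from the total absolute sum with one closed +2 formula,
-- instead of A's fused three-accumulator loop with nested parity branches (objective: alternative).

-- ===== PORT A =====
def makeProductOneStepA (arr : List Int) (s : Int × Int × Int) (idx : Int) : Int × Int × Int :=
  let x := PySem.List.pyGetD arr idx 0
  if x ≥ 1 then (s.1 + (x - 1), s.2.1, s.2.2)
  else if x ≤ -1 then (s.1 + (|x| - 1), s.2.1, s.2.2 + 1)
  else if x = 0 then (s.1, s.2.1 + 1, s.2.2)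
  else s

def makeProductOne (arr : List Int) (n : Int) : Int :=
  let st := (PySem.List.pyRange 0 n 1).foldl (makeProductOneStepA arr) (0, 0, 0)
  let coins := st.1
  let zeros := st.2.1
  let negatives := st.2.2
  if PySem.Int.mod (negatives + zeros) 2 = 0 ∨ PySem.Int.mod negatives 2 = 0 then coins + zeros
  else if PySem.Int.mod negatives 2 = 1 then coins + zeros + 2
  else 0  -- Python falls through returning None here; unreachable (negatives % 2 is 0 or 1)

-- ===== PORT B =====
-- the while loop 'while i < len(xs) and p(xs[i]): i += 1'
def mpoScan (xs : List Int) (p : Int → Bool) (i : Nat) : Nat :=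
  if h : i < xs.length then
    if p xs[i] then mpoScan xs p (i + 1) else i
  else i
termination_by xs.length - i

def makeProductOne_alt (arr : List Int) (n : Int) : Int :=
  let xs := PySem.List.sorted ((PySem.List.pyRange 0 n 1).map (fun idx => PySem.List.pyGetD arr idx 0)) (fun x => x) false
  let neg := mpoScan xs (fun x => decide (x < 0)) 0
  let z := mpoScan xs (fun x => x == 0) neg
  let zeros := z - neg
  let coins := (xs.map (fun x => |x|)).sum - ((xs.length : Int) - (zeros : Int))
  coins + (zeros : Int) + (if PySem.Int.mod (neg : Int) 2 = 1 ∧ PySem.Int.mod (zeros : Int) 2 = 0 then 2 else 0)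

-- ===== PRECONDITION & SPEC =====
-- n > len(arr) is excluded because A (and B) raise IndexError there.
def Pre_makeProductOne (arr : List Int) (n : Int) : Prop := n ≤ arr.length
instance (arr : List Int) (n : Int) : Decidable (Pre_makeProductOne arr n) := by
  unfold Pre_makeProductOne; infer_instance

def pvWitness_makeProductOne : List Int × Int := ([-2, 0, 3], 3)

def Spec_makeProductOne (arr : List Int) (n : Int) (out : Int) : Prop := out = makeProductOne_alt arr n
instance (arr : List Int) (n : Int) (out : Int) : Decidable (Spec_makeProductOne arr n out) := by
  unfold Spec_makeProductOne; infer_instance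

-- ===== CLAIM (what is proved, stated in full; the proofs are below) =====
def Claim_equal_makeProductOne : Prop := ∀ (arr : List Int) (n : Int), Dom_makeProductOne arr n → Pre_makeProductOne arr n → Spec_makeProductOne arr n (makeProductOne arr n)

-- ===== LEMMAS AND PROOFS =====

-- A's loop over range(m), read through arr, is the element-wise fold over the prefix arr.take m.
lemma foldA_prefix (arr : List Int) (m : Nat) (h : m ≤ arr.length) (s : Int × Int × Int) :
    (PySem.List.pyRange 0 (m : Int) 1).foldl (makeProductOneStepA arr) s
      = (arr.take m).foldl (fun s x =>
          if x ≥ 1 then (s.1 + (x - 1), s.2.1, s.2.2)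
          else if x ≤ -1 then (s.1 + (|x| - 1), s.2.1, s.2.2 + 1)
          else if x = 0 then (s.1, s.2.1 + 1, s.2.2)
          else s) s := by
  induction m generalizing s with
  | zero => simp [PySem.List.pyRange_one_eq_nil]
  | succ k ih =>
    have hk : k < arr.length := by omega
    have hcast : ((k + 1 : Nat) : Int) = (k : Int) + 1 := by push_cast; ring
    have ht : arr.take (k + 1) = arr.take k ++ [arr[k]] := by
      rw [List.take_add_one]
      simp [List.getElem?_eq_getElem hk]
    rw [hcast, PySem.List.pyRange_one_succ_right (by positivity),
        List.foldl_append, ih (by omega), ht, List.foldl_append]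
    simp [makeProductOneStepA, PySem.List.pyGetD_natCast, List.getD,
          List.getElem?_eq_getElem hk]

-- the element-wise fold computes the three aggregates
lemma foldA_aggregates (xs : List Int) (c z g : Int) :
    xs.foldl (fun s x =>
        if x ≥ 1 then (s.1 + (x - 1), s.2.1, s.2.2)
        else if x ≤ -1 then (s.1 + (|x| - 1), s.2.1, s.2.2 + 1)
        else if x = 0 then (s.1, s.2.1 + 1, s.2.2)
        else s) (c, z, g)
      = (c + ((xs.filter (fun x => x != 0)).map (fun x => |x| - 1)).sum,
         z + (xs.countP (fun x => x == 0) : Int),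
         g + (xs.countP (fun x => decide (x < 0)) : Int)) := by
  induction xs generalizing c z g with
  | nil => simp
  | cons x xs ih =>
    rcases lt_trichotomy x 0 with hx | hx | hx
    · have h1 : ¬ x ≥ 1 := by omega
      have h2 : x ≤ -1 := by omega
      have h0 : x ≠ 0 := by omega
      have habs : |x| = -x := abs_of_neg hx
      simp [List.foldl_cons, h1, h2, h0, ih, hx, habs]
      refine ⟨by ring, by ring⟩
    · subst hx
      simp [List.foldl_cons, ih]
      ring
    · have h1 : x ≥ 1 := by omega
      have h0 : x ≠ 0 := by omega
      have hneg : ¬ x < 0 := by omega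
      have habs : |x| = x := abs_of_pos hx
      simp [List.foldl_cons, h1, h0, hneg, ih, habs]
      ring

-- the list comprehension [arr[idx] for idx in range(n)] is the prefix arr.take m
lemma comp_prefix (arr : List Int) (m : Nat) (h : m ≤ arr.length) :
    (PySem.List.pyRange 0 (m : Int) 1).map (fun idx => PySem.List.pyGetD arr idx 0)
      = arr.take m := by
  induction m with
  | zero => simp [PySem.List.pyRange_one_eq_nil]
  | succ k ih =>
    have hk : k < arr.length := by omega
    have hcast : ((k + 1 : Nat) : Int) = (k : Int) + 1 := by push_cast; ring
    have ht : arr.take (k + 1) = arr.take k ++ [arr[k]] := by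
      rw [List.take_add_one]
      simp [List.getElem?_eq_getElem hk]
    rw [hcast, PySem.List.pyRange_one_succ_right (by positivity),
        List.map_append, ih (by omega), ht]
    simp [PySem.List.pyGetD_natCast, List.getD, List.getElem?_eq_getElem hk]

-- the index while-scan stops at the end of the p-prefix from i
lemma mpoScan_eq (xs : List Int) (p : Int → Bool) :
    ∀ (d i : Nat), xs.length - i = d → i ≤ xs.length →
      mpoScan xs p i = i + ((xs.drop i).takeWhile p).length := by
  intro d
  induction d with
  | zero =>
    intro i hd hi
    have : i = xs.length := by omega
    subst this
    rw [mpoScan]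
    simp
  | succ k ih =>
    intro i hd hi
    have hlt : i < xs.length := by omega
    have hdrop : xs.drop i = xs[i] :: xs.drop (i + 1) := List.drop_eq_getElem_cons hlt
    rw [mpoScan, dif_pos hlt]
    by_cases hp : p xs[i]
    · rw [if_pos hp, ih (i + 1) (by omega) (by omega)]
      have hw : (xs.drop i).takeWhile p = xs[i] :: (xs.drop (i + 1)).takeWhile p := by
        rw [hdrop, List.takeWhile_cons, if_pos hp]
      rw [hw]
      simp
      omega
    · rw [if_neg hp]
      have hw : (xs.drop i).takeWhile p = [] := by
        rw [hdrop, List.takeWhile_cons, if_neg hp]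
      rw [hw]
      simp

-- on a ≤-sorted list the (<0)-prefix length is the count of negatives
lemma takeWhile_neg_count (xs : List Int) (hs : xs.Pairwise (· ≤ ·)) :
    (xs.takeWhile (fun x => decide (x < 0))).length = xs.countP (fun x => decide (x < 0)) := by
  induction xs with
  | nil => simp
  | cons a t ih =>
    rcases List.pairwise_cons.mp hs with ⟨ha, ht⟩
    by_cases hneg : a < 0
    · simp [hneg, ih ht]
    · have hz : t.countP (fun x => decide (x < 0)) = 0 := by
        rw [List.countP_eq_zero]
        intro x hx
        have := ha x hx
        simp; omega
      simp [hneg, hz]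

-- on a ≤-sorted nonnegative list the (=0)-prefix length is the count of zeros
lemma takeWhile_zero_count_nonneg (xs : List Int) (hs : xs.Pairwise (· ≤ ·))
    (h0 : ∀ x ∈ xs, 0 ≤ x) :
    (xs.takeWhile (fun x => x == 0)).length = xs.countP (fun x => x == 0) := by
  induction xs with
  | nil => simp
  | cons a t ih =>
    rcases List.pairwise_cons.mp hs with ⟨ha, ht⟩
    by_cases hz : a = 0
    · subst hz
      simp [
            ih ht (fun x hx => h0 x (List.mem_cons_of_mem _ hx))]
    · have hpos : 0 < a := lt_of_le_of_ne (h0 a (List.mem_cons_self)) (Ne.symm hz)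
      have hcz : t.countP (fun x => x == 0) = 0 := by
        rw [List.countP_eq_zero]
        intro x hx
        have := ha x hx
        simp; omega
      simp [hz, hcz]

-- on a ≤-sorted list the (=0)-run after the negatives counts all zeros
lemma zero_run_count (xs : List Int) (hs : xs.Pairwise (· ≤ ·)) :
    ((xs.dropWhile (fun x => decide (x < 0))).takeWhile (fun x => x == 0)).length
      = xs.countP (fun x => x == 0) := by
  induction xs with
  | nil => simp
  | cons a t ih =>
    rcases List.pairwise_cons.mp hs with ⟨ha, ht⟩
    by_cases hneg : a < 0
    · have h0 : ¬ (a == 0) = true := by simp; omega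
      simp [hneg, h0, ih ht]
    · have hge : 0 ≤ a := by omega
      have hall : ∀ x ∈ a :: t, 0 ≤ x := by
        intro x hx
        rcases List.mem_cons.mp hx with h | h
        · omega
        · exact le_trans hge (ha x h)
      have := takeWhile_zero_count_nonneg (a :: t) hs hall
      simpa [List.dropWhile_cons, hneg] using this

lemma coins_bridge (xs : List Int) :
    ((xs.filter (fun x => x != 0)).map (fun x => |x| - 1)).sum
      = (xs.map (fun x => |x|)).sum - ((xs.length : Int) - (xs.countP (fun x => x == 0) : Int)) := by
  induction xs with
  | nil => simp
  | cons a t ih =>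
    by_cases hz : a = 0
    · subst hz
      simp [ih]
    · simp [hz, ih]
      ring

-- ===== VERDICT (by name: the statement is the Claim_ definition above) =====
theorem makeProductOne_spec : Claim_equal_makeProductOne := by
  intro arr n _ hpre
  have hnlen : n ≤ (arr.length : Int) := hpre
  by_cases hn0 : 0 ≤ n
  case neg =>
    have hr : PySem.List.pyRange 0 n 1 = [] :=
      PySem.List.pyRange_one_eq_nil (by omega)
    have hnil : PySem.List.sorted ([] : List Int) (fun x => x) false = [] := by
      have h := PySem.List.sorted_perm ([] : List Int) (fun x => x) false
      simpa using h.eq_nil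
    have hms : ∀ p : Int → Bool, mpoScan [] p 0 = 0 := by
      intro p
      rw [mpoScan]
      simp
    unfold Spec_makeProductOne makeProductOne makeProductOne_alt
    rw [hr]
    simp [hnil, hms]
  unfold Spec_makeProductOne makeProductOne makeProductOne_alt
  have hn : n = ((n.toNat : Nat) : Int) := (Int.toNat_of_nonneg hn0).symm
  have hmle : n.toNat ≤ arr.length := by omega
  rw [hn, foldA_prefix arr n.toNat hmle, foldA_aggregates, comp_prefix arr n.toNat hmle]
  dsimp only
  set ys := arr.take n.toNat with hys
  set xs := PySem.List.sorted ys (fun x => x) false with hxs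
  have hperm : xs.Perm ys := PySem.List.sorted_perm ys (fun x => x) false
  have hsort : xs.Pairwise (· ≤ ·) := by
    simpa using PySem.List.sorted_pairwise ys (fun x => x)
  have hscan0 : ∀ p : Int → Bool, mpoScan xs p 0 = ((xs.takeWhile p).length : Nat) := by
    intro p
    rw [mpoScan_eq xs p (xs.length - 0) 0 rfl (Nat.zero_le _)]
    simp
  have hneg : mpoScan xs (fun x => decide (x < 0)) 0
      = ys.countP (fun x => decide (x < 0)) := by
    rw [hscan0, takeWhile_neg_count xs hsort, hperm.countP_eq]
  have hnegle : mpoScan xs (fun x => decide (x < 0)) 0 ≤ xs.length := by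
    rw [hscan0]
    exact (List.takeWhile_prefix _).length_le
  have hdropTake : xs.drop (mpoScan xs (fun x => decide (x < 0)) 0)
      = xs.dropWhile (fun x => decide (x < 0)) := by
    rw [hscan0]
    have h := @List.drop_left _ (xs.takeWhile (fun x => decide (x < 0)))
      (xs.dropWhile (fun x => decide (x < 0)))
    rwa [List.takeWhile_append_dropWhile] at h
  have hz : mpoScan xs (fun x => x == 0) (mpoScan xs (fun x => decide (x < 0)) 0)
      = mpoScan xs (fun x => decide (x < 0)) 0 + ys.countP (fun x => x == 0) := by
    rw [mpoScan_eq xs _ (xs.length - mpoScan xs (fun x => decide (x < 0)) 0) _ rfl hnegle,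
        hdropTake, zero_run_count xs hsort, hperm.countP_eq]
  rw [hz, hneg]
  have hsum : (xs.map (fun x => |x|)).sum = (ys.map (fun x => |x|)).sum :=
    (hperm.map (fun x => |x|)).sum_eq
  have hlen : xs.length = ys.length := hperm.length_eq
  rw [hsum, hlen, coins_bridge ys]
  set Z := ys.countP (fun x => x == 0) with hZ
  set G := ys.countP (fun x => decide (x < 0)) with hG
  set S := (ys.map (fun x => |x|)).sum with hS
  have hzz : G + Z - G = Z := by omega
  rw [hzz]
  simp only [zero_add, PySem.Int.mod_eq_emod_of_pos (show (0:Int) < 2 by norm_num)]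
  split_ifs with h1 h2 h3 <;> omega
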